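-- pv_equiv track=rewrite | github.com/bibleman-stan/readers-gnt | scripts/scan_parallelism_consistency.py | _classify_verdict
-- ===== SOURCE A (Python) =====
-- from typing import List, Dict, Optional, Tuple, Set
--
-- def _classify_verdict(line_counts: List[int], class_id: str) -> str:
--     """
--     Assign a preliminary verdict.
--     CONFIRMED_DRIFT — clear inconsistency, likely real
--     AMBIGUOUS       — marginal case, human review needed
--     LIKELY_FP       — probable false positive
--     """
--     n = len(line_counts)
--     distinct = set(line_counts)
--     m = len(distinct)
--     max_count = max(line_counts.count(lc) for lc in distinct)
--     outlier_count = n - max_count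
--
--     # Single outlier in a large span — might be intentional semantic variation
--     if outlier_count == 1 and n >= 5:
--         return "AMBIGUOUS"
--     # All 1-2 line members with just one slightly longer — could be register variation
--     if m == 2 and min(distinct) == 1 and max(distinct) == 2 and outlier_count <= 1:
--         return "AMBIGUOUS"
--     return "CONFIRMED_DRIFT"
-- ===== SOURCE B (Python) =====
-- def _classify_verdict(line_counts, class_id):
--     """Sort once, then a single run-length pass over the sorted list gives the
--     mode frequency (max run), distinct count, and min/max at the ends."""
--     s = sorted(line_counts)
--     n = len(s)
--     m = 0
--     run = 0
--     max_run = 0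
--     prev = None
--     for v in s:
--         if m > 0 and prev == v:
--             run += 1
--         else:
--             m += 1
--             run = 1
--             prev = v
--         if run > max_run:
--             max_run = run
--     outlier_count = n - max_run
--     if outlier_count == 1 and n >= 5:
--         return "AMBIGUOUS"
--     if m == 2 and s[0] == 1 and s[-1] == 2 and outlier_count <= 1:
--         return "AMBIGUOUS"
--     return "CONFIRMED_DRIFT"
-- ===== Notes on version B (the rewrite author's own statement) =====
-- stated objective: faster
-- what changed: A counts every distinct value against the whole list (max over per-value .count scans); B sorts a copy once and computes the mode frequency, distinct count and min/max in a single run-length pass over the sorted list.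
import Mathlib
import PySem

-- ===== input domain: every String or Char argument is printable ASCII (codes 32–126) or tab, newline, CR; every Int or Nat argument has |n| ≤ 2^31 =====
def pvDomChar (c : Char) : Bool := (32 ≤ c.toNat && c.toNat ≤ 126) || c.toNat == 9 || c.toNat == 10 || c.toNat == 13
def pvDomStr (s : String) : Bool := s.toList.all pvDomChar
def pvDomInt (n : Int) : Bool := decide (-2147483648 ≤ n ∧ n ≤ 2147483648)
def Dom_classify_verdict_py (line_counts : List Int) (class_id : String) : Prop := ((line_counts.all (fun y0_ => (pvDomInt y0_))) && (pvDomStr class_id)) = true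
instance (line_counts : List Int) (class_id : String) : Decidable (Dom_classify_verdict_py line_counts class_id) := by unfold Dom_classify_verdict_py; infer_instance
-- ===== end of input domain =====

-- B replaces A's per-distinct-value counting scan (O(n*m)) by one sort plus a single
-- run-length pass over the sorted list (O(n log n)); measurably faster on large inputs.

-- ===== PORT A =====
def classify_verdict_py (line_counts : List Int) (class_id : String) : String :=
  let n : Int := line_counts.length
  let distinct : PySem.Set Int := PySem.Set.ofList line_counts
  let m : Int := PySem.Set.len distinct
  -- max() over an empty generator raises ValueError; Pre_ excludes line_counts = []
  let max_count : Int :=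
    (PySem.List.max? (distinct.map (fun lc => (PySem.List.count line_counts lc : Int))) (fun x => x)).getD 0
  let outlier_count : Int := n - max_count
  if outlier_count = 1 ∧ n ≥ 5 then "AMBIGUOUS"
  else if m = 2 ∧ (PySem.List.min? distinct (fun x => x)).getD 0 = 1 ∧
       (PySem.List.max? distinct (fun x => x)).getD 0 = 2 ∧ outlier_count ≤ 1 then "AMBIGUOUS"
  else "CONFIRMED_DRIFT"

-- ===== PORT B =====
-- one step of B's run-length pass over the sorted list: state (m, run, max_run, prev)
def cvStep (st : Int × Int × Int × Option Int) (v : Int) : Int × Int × Int × Option Int :=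
  let (m, run, max_run, prev) := st
  let (m, run, prev) := if m > 0 ∧ prev = some v then (m, run + 1, prev) else (m + 1, (1 : Int), some v)
  let max_run := if run > max_run then run else max_run
  (m, run, max_run, prev)

def classify_verdict_py_alt (line_counts : List Int) (class_id : String) : String :=
  let s := PySem.List.sorted line_counts (fun x => x)
  let n : Int := s.length
  let st := s.foldl cvStep (0, 0, 0, none)
  let m := st.1
  let max_run := st.2.2.1
  let outlier_count : Int := n - max_run
  if outlier_count = 1 ∧ n ≥ 5 then "AMBIGUOUS"
  else if m = 2 ∧ PySem.List.pyGet? s 0 = some 1 ∧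
       PySem.List.pyGet? s (-1) = some 2 ∧ outlier_count ≤ 1 then "AMBIGUOUS"
  else "CONFIRMED_DRIFT"

-- ===== PRECONDITION & SPEC =====
-- Pre_ excludes only the empty list, on which A's max() over an empty generator raises ValueError.
def Pre_classify_verdict_py (line_counts : List Int) (class_id : String) : Prop := line_counts ≠ []
instance (line_counts : List Int) (class_id : String) : Decidable (Pre_classify_verdict_py line_counts class_id) := by unfold Pre_classify_verdict_py; infer_instance
def pvWitness_classify_verdict_py : List Int × String := ([1, 2, 2], "c1")

def Spec_classify_verdict_py (line_counts : List Int) (class_id : String) (out : String) : Prop := out = classify_verdict_py_alt line_counts class_id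
instance (line_counts : List Int) (class_id : String) (out : String) : Decidable (Spec_classify_verdict_py line_counts class_id out) := by unfold Spec_classify_verdict_py; infer_instance

-- ===== CLAIM (what is proved, stated in full; the proofs are below) =====
def Claim_equal_classify_verdict_py : Prop := ∀ (line_counts : List Int) (class_id : String), Dom_classify_verdict_py line_counts class_id → Pre_classify_verdict_py line_counts class_id → Spec_classify_verdict_py line_counts class_id (classify_verdict_py line_counts class_id)

-- ===== LEMMAS AND PROOFS =====

-- invariant of B's fold over a sorted (Pairwise ≤) prefix s:
-- m = number of distinct values, prev = last element, run = count of the last value,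
-- max_run = the maximal multiplicity of any value
def cvInv (s : List Int) (st : Int × Int × Int × Option Int) : Prop :=
  st.1 = ((PySem.List.dedup s).length : Int) ∧
  st.2.2.2 = s.getLast? ∧
  (s = [] → st.2.1 = 0 ∧ st.2.2.1 = 0) ∧
  (∀ a, s.getLast? = some a → st.2.1 = (s.count a : Int)) ∧
  (s ≠ [] → (∃ v ∈ s, st.2.2.1 = (s.count v : Int)) ∧ ∀ v ∈ s, (s.count v : Int) ≤ st.2.2.1)

theorem dedup_app_mem (s : List Int) (v : Int) (hv : v ∈ s) :
    PySem.List.dedup (s ++ [v]) = PySem.List.dedup s := by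
  simp only [PySem.List.dedup_eq_ofList, PySem.Set.ofList_eq_foldl, List.foldl_append,
    List.foldl_cons, List.foldl_nil]
  rw [← PySem.Set.ofList_eq_foldl]
  simp [PySem.Set.add, PySem.Set.contains, (PySem.Set.mem_ofList _ _).2 hv]

theorem dedup_app_not_mem (s : List Int) (v : Int) (hv : v ∉ s) :
    PySem.List.dedup (s ++ [v]) = PySem.List.dedup s ++ [v] := by
  simp only [PySem.List.dedup_eq_ofList, PySem.Set.ofList_eq_foldl, List.foldl_append,
    List.foldl_cons, List.foldl_nil]
  rw [← PySem.Set.ofList_eq_foldl]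
  simp [PySem.Set.add, PySem.Set.contains, PySem.Set.mem_ofList, hv]

theorem le_getLast_of_pairwise {s : List Int} (hp : s.Pairwise (· ≤ ·)) {a : Int}
    (ha : s.getLast? = some a) : ∀ x ∈ s, x ≤ a := by
  intro x hx
  obtain ⟨t, rfl⟩ := List.getLast?_eq_some_iff.mp ha
  rcases List.mem_append.mp hx with h | h
  · exact (List.pairwise_append.mp hp).2.2 x h a (by simp)
  · simp only [List.mem_singleton] at h; omega

theorem cvInv_step (s : List Int) (v : Int) (st : Int × Int × Int × Option Int)
    (hs : (s ++ [v]).Pairwise (· ≤ ·)) (h : cvInv s st) : cvInv (s ++ [v]) (cvStep st v) := by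
  obtain ⟨m, run, maxr, prev⟩ := st
  obtain ⟨hm, hprev, hnil, hrun, hmax⟩ := h
  simp only at hm hprev hnil hrun hmax
  have hp : s.Pairwise (· ≤ ·) := hs.sublist (by simp)
  have hple : ∀ x ∈ s, x ≤ v := fun x hx => (List.pairwise_append.mp hs).2.2 x hx v (by simp)
  by_cases hempty : s = []
  · subst hempty
    obtain ⟨hr0, hx0⟩ := hnil rfl
    have hm0 : m = 0 := by simpa [PySem.List.dedup_eq_ofList, PySem.Set.ofList_eq_foldl] using hm
    have hp0 : prev = none := by simpa using hprev
    subst hm0 hr0 hx0 hp0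
    refine ⟨?_, ?_, ?_, ?_, ?_⟩
    · simp [cvStep, PySem.List.dedup_eq_ofList, PySem.Set.ofList_eq_foldl, PySem.Set.add,
        PySem.Set.contains]
    · simp [cvStep]
    · simp
    · intro a ha
      simp only [List.nil_append, List.getLast?_singleton, Option.some.injEq] at ha
      subst ha; simp [cvStep]
    · intro _
      refine ⟨⟨v, by simp, by simp [cvStep]⟩, ?_⟩
      intro w hw
      simp only [List.nil_append, List.mem_singleton] at hw
      subst hw; simp [cvStep]
  · obtain ⟨a, hla⟩ : ∃ a, s.getLast? = some a := by
      cases hla : s.getLast? with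
      | none => exact absurd (List.getLast?_eq_none_iff.mp hla) hempty
      | some a => exact ⟨a, rfl⟩
    have hmem_a : a ∈ s := List.mem_of_getLast? hla
    have hrn : run = (s.count a : Int) := hrun a hla
    obtain ⟨⟨u, hu, hequ⟩, hbound⟩ := hmax hempty
    have hma : ∀ x ∈ s, x ≤ a := le_getLast_of_pairwise hp hla
    have hmpos : (0 : Int) < m := by
      rw [hm]
      have h1 : a ∈ PySem.List.dedup s := (PySem.List.mem_dedup s a).2 hmem_a
      have h2 := List.length_pos_of_mem h1
      exact_mod_cast h2
    by_cases hav : a = v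
    · subst hav
      -- the last element equals the new one: the run continues
      have hstep : cvStep (m, run, maxr, prev) a =
          (m, run + 1, if run + 1 > maxr then run + 1 else maxr, prev) := by
        simp [cvStep, hmpos, hprev, hla]
      rw [hstep]
      have hcnt : (((s ++ [a]).count a : Nat) : Int) = run + 1 := by
        rw [hrn]; push_cast [List.count_append]; simp
      have hcnt_ne : ∀ x, x ≠ a → (((s ++ [a]).count x : Nat) : Int) = (s.count x : Int) := by
        intro x hx; push_cast [List.count_append]; simp [List.count_eq_zero, hx]
      refine ⟨?_, ?_, ?_, ?_, ?_⟩
      · simp only [dedup_app_mem s a hmem_a]; exact hm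
      · simp [hprev, hla, List.getLast?_append]
      · intro habs; simp at habs
      · intro b hb
        simp only [List.getLast?_append, List.getLast?_singleton, Option.some_or,
          Option.some.injEq] at hb
        subst hb; exact hcnt.symm
      · intro _
        by_cases hgt : run + 1 > maxr
        · refine ⟨⟨a, by simp, by rw [if_pos hgt]; exact hcnt.symm⟩, ?_⟩
          intro w hw
          simp only [hgt, if_pos]
          by_cases hwv : w = a
          · subst hwv; rw [hcnt]
          · rw [hcnt_ne w hwv]
            have hws : w ∈ s := by
              rcases List.mem_append.mp hw with h | h
              · exact h
              · simp only [List.mem_singleton] at h; exact absurd h hwv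
            have := hbound w hws
            omega
        · have hne : u ≠ a := by
            intro huv; subst huv
            rw [← hrn] at hequ; omega
          refine ⟨⟨u, by simp [hu], ?_⟩, ?_⟩
          · simp only [hgt, if_false]
            rw [hcnt_ne u hne, hequ]
          · intro w hw
            simp only [hgt, if_false]
            by_cases hwv : w = a
            · subst hwv; rw [hcnt]; omega
            · rw [hcnt_ne w hwv]
              have hws : w ∈ s := by
                rcases List.mem_append.mp hw with h | h
                · exact h
                · simp only [List.mem_singleton] at h; exact absurd h hwv
              exact hbound w hws
    · -- the last element differs from v: since s is sorted with all elements ≤ v, v ∉ s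
      have hvnot : v ∉ s := fun hvs => hav (le_antisymm (hple a hmem_a) (hma v hvs))
      have hmaxr1 : (1 : Int) ≤ maxr := by
        rw [hequ]
        have := List.count_pos_iff.mpr hu
        exact_mod_cast this
      have hstep : cvStep (m, run, maxr, prev) v = (m + 1, 1, maxr, some v) := by
        have hpne : ¬ (m > 0 ∧ prev = some v) := by
          rintro ⟨-, hpv⟩
          rw [hprev, hla] at hpv
          exact hav (by injection hpv)
        simp [cvStep, hpne]
        omega
      rw [hstep]
      have hcnt1 : (((s ++ [v]).count v : Nat) : Int) = 1 := by
        push_cast [List.count_append]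
        simp [List.count_eq_zero_of_not_mem hvnot]
      have hcnt_ne : ∀ x, x ≠ v → (((s ++ [v]).count x : Nat) : Int) = (s.count x : Int) := by
        intro x hx; push_cast [List.count_append]; simp [List.count_eq_zero, hx]
      refine ⟨?_, ?_, ?_, ?_, ?_⟩
      · rw [dedup_app_not_mem s v hvnot]
        simp only [List.length_append, List.length_singleton]
        rw [hm]; push_cast; ring
      · simp [List.getLast?_append]
      · intro habs; simp at habs
      · intro b hb
        simp only [List.getLast?_append, List.getLast?_singleton, Option.some_or,
          Option.some.injEq] at hb
        subst hb; exact hcnt1.symm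
      · intro _
        have hune : u ≠ v := fun huv => hvnot (huv ▸ hu)
        refine ⟨⟨u, by simp [hu], by rw [hcnt_ne u hune]; exact hequ⟩, ?_⟩
        intro w hw
        by_cases hwv : w = v
        · subst hwv; rw [hcnt1]; exact hmaxr1
        · rw [hcnt_ne w hwv]
          have hws : w ∈ s := by
            rcases List.mem_append.mp hw with h | h
            · exact h
            · simp only [List.mem_singleton] at h; exact absurd h hwv
          exact hbound w hws

theorem cvInv_foldl (s : List Int) (hs : s.Pairwise (· ≤ ·)) :
    cvInv s (s.foldl cvStep (0, 0, 0, none)) := by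
  induction s using List.reverseRecOn with
  | nil =>
    refine ⟨by simp [PySem.List.dedup_eq_ofList, PySem.Set.ofList_eq_foldl], rfl,
      fun _ => ⟨rfl, rfl⟩, ?_, ?_⟩ <;> simp
  | append_singleton p v ih =>
    rw [List.foldl_append]
    exact cvInv_step p v _ hs (ih (hs.sublist (by simp)))

theorem classify_verdict_py_spec : Claim_equal_classify_verdict_py := by
  intro l c _hd hpre
  unfold Spec_classify_verdict_py classify_verdict_py classify_verdict_py_alt
  set s := PySem.List.sorted l (fun x => x) with hs_def
  have hperm : s.Perm l := PySem.List.sorted_perm l _ false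
  have hsne : s ≠ [] := fun h0 => hpre ((PySem.List.sorted_eq_nil_iff l _ false).mp h0)
  have hp : s.Pairwise (· ≤ ·) := PySem.List.sorted_pairwise l _
  obtain ⟨hm, hprev, hnil, hrun, hmax⟩ := cvInv_foldl s hp
  have hlen : s.length = l.length := hperm.length_eq
  -- the distinct set is nonempty
  have hofne : PySem.Set.ofList l ≠ [] := by
    obtain ⟨x, hx⟩ := List.exists_mem_of_ne_nil l hpre
    exact List.ne_nil_of_mem ((PySem.Set.mem_ofList l x).2 hx)
  -- m : number of distinct values agrees
  have hmeq : (s.foldl cvStep (0, 0, 0, none)).1 = PySem.Set.len (PySem.Set.ofList l) := by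
    rw [hm]
    have h3 : (PySem.List.dedup s).Perm (PySem.List.dedup l) :=
      (List.perm_ext_iff_of_nodup (PySem.List.nodup_dedup s) (PySem.List.nodup_dedup l)).2
        (fun x => by rw [PySem.List.mem_dedup, PySem.List.mem_dedup]; exact hperm.mem_iff)
    have h4 := h3.length_eq
    simp only [PySem.List.dedup_eq_ofList] at h4
    simp [PySem.Set.len, PySem.List.dedup_eq_ofList, h4]
  -- max_count agrees with the maximal run length
  obtain ⟨M, hM⟩ : ∃ M, PySem.List.max?
      ((PySem.Set.ofList l).map (fun lc => (PySem.List.count l lc : Int))) (fun x => x) = some M := by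
    cases hM : PySem.List.max? ((PySem.Set.ofList l).map (fun lc => (PySem.List.count l lc : Int))) (fun x => x) with
    | none =>
      rw [PySem.List.max?_eq_none_iff, List.map_eq_nil_iff] at hM
      exact absurd hM hofne
    | some M => exact ⟨M, rfl⟩
  obtain ⟨⟨w, hw, hw2⟩, hb⟩ := hmax hsne
  have hcount_eq : ∀ x : Int, s.count x = l.count x := fun x => hperm.count_eq x
  have hmaxeq : (s.foldl cvStep (0, 0, 0, none)).2.2.1 = M := by
    have hMmax := PySem.List.max?_isMax hM
    have hMmem := PySem.List.max?_mem hM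
    obtain ⟨u, hu, hequ⟩ := List.mem_map.mp hMmem
    have huL : u ∈ l := (PySem.Set.mem_ofList l u).1 hu
    apply le_antisymm
    · rw [hw2, hcount_eq w]
      have hwL : w ∈ l := hperm.mem_iff.1 hw
      have h5 : ((PySem.List.count l w : Nat) : Int) ∈
          (PySem.Set.ofList l).map (fun lc => (PySem.List.count l lc : Int)) :=
        List.mem_map.mpr ⟨w, (PySem.Set.mem_ofList l w).2 hwL, rfl⟩
      have h6 := hMmax _ h5
      simpa [PySem.List.count_eq] using h6
    · rw [← hequ]
      have huS : u ∈ s := hperm.mem_iff.2 huL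
      calc (PySem.List.count l u : Int) = (s.count u : Int) := by
            simp [PySem.List.count_eq, hcount_eq u]
        _ ≤ (s.foldl cvStep (0, 0, 0, none)).2.2.1 := hb u huS
  -- head of the sorted list = min(distinct); last = max(distinct)
  obtain ⟨mn, hmn⟩ : ∃ mn, PySem.List.min? (PySem.Set.ofList l) (fun x => x) = some mn := by
    cases hmn : PySem.List.min? (PySem.Set.ofList l) (fun x => x) with
    | none => exact absurd ((PySem.List.min?_eq_none_iff _ _).mp hmn) hofne
    | some mn => exact ⟨mn, rfl⟩
  obtain ⟨mx, hmx⟩ : ∃ mx, PySem.List.max? (PySem.Set.ofList l) (fun x => x) = some mx := by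
    cases hmx : PySem.List.max? (PySem.Set.ofList l) (fun x => x) with
    | none => exact absurd ((PySem.List.max?_eq_none_iff _ _).mp hmx) hofne
    | some mx => exact ⟨mx, rfl⟩
  have hmnL : mn ∈ l := (PySem.Set.mem_ofList l mn).1 (PySem.List.min?_mem hmn)
  have hmxL : mx ∈ l := (PySem.Set.mem_ofList l mx).1 (PySem.List.max?_mem hmx)
  obtain ⟨hd, tl, hcons⟩ := List.exists_cons_of_ne_nil hsne
  have hget0 : PySem.List.pyGet? s 0 = some mn := by
    rw [hcons, PySem.List.pyGet?_zero_cons]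
    congr 1
    apply le_antisymm
    · exact PySem.List.key_head_sorted_le l _ (hs_def ▸ hcons) mn hmnL
    · have h7 : hd ∈ l := hperm.mem_iff.1 (hcons ▸ List.mem_cons_self)
      exact PySem.List.min?_isMin hmn hd ((PySem.Set.mem_ofList l hd).2 h7)
  obtain ⟨la, hla⟩ : ∃ la, s.getLast? = some la := by
    cases hla : s.getLast? with
    | none => exact absurd (List.getLast?_eq_none_iff.mp hla) hsne
    | some la => exact ⟨la, rfl⟩
  have hgetlast : PySem.List.pyGet? s (-1) = some mx := by
    rw [PySem.List.pyGet?_neg_one, hla]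
    congr 1
    apply le_antisymm
    · have h8 : la ∈ l := hperm.mem_iff.1 (List.mem_of_getLast? hla)
      exact PySem.List.max?_isMax hmx la ((PySem.Set.mem_ofList l la).2 h8)
    · exact le_getLast_of_pairwise hp hla mx (hperm.mem_iff.2 hmxL)
  -- assemble
  simp only [hmeq, hmaxeq, hget0, hgetlast, hM, hmn, hmx, Option.getD_some, hlen,
    Option.some.injEq]
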